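-- pv_equiv track=rewrite | github.com/jiaola/usaco | bronze/bcs/bcs.py | check
-- ===== SOURCE A (Python) =====
-- def check(figure, p1, p2, n, cf, c1, c2):
--     if c1 + c2 != cf:
--         return False
--     for i1 in range(1-n, n-1):
--         for j1 in range(1-n, n-1):
--             for i2 in range(1-n, n-1):
--                 for j2 in range(1-n, n-1):
--                     valid = True
--                     for i in range(n):
--                         for j in range(n):
--                             value = '.'
--                             if 0 <= i-i1 < n and 0 <= j-j1 < n:
--                                 value = p1[i-i1][j-j1]
--                             if 0 <= i-i2 < n and 0 <= j-j2 < n: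
--                                 if p2[i-i2][j-j2] == '#':
--                                     if value == '#':
--                                         valid = False
--                                         break
--                                     else:
--                                         value = p2[i-i2][j-j2]
--                             if value != figure[i][j]:
--                                 valid = False
--                                 break
--                         if not valid:
--                             break
--                     if valid:
--                         return True
--     return False
-- ===== SOURCE B (Python) =====
-- def check(figure, p1, p2, n, cf, c1, c2):
--     if c1 + c2 != cf:
--         return False
--     offs = range(1 - n, n - 1)
--     cells = [(i, j) for i in range(n) for j in range(n)]
--
--     def v1(i1, j1, i, j):
--         if 0 <= i - i1 < n and 0 <= j - j1 < n:
--             return p1[i - i1][j - j1]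
--         return '.'
--
--     # all possible in-window '#'-cell signatures of piece 2, precomputed once
--     p2_sets = {
--         tuple((i, j) for (i, j) in cells
--               if 0 <= i - i2 < n and 0 <= j - j2 < n and p2[i - i2][j - j2] == '#')
--         for i2 in offs for j2 in offs
--     }
--     for i1 in offs:
--         for j1 in offs:
--             if all(v1(i1, j1, i, j) == figure[i][j]
--                    or (figure[i][j] == '#' and v1(i1, j1, i, j) != '#')
--                    for (i, j) in cells):
--                 mism = tuple((i, j) for (i, j) in cells
--                              if v1(i1, j1, i, j) != figure[i][j])
--                 if mism in p2_sets:
--                     return True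
--     return False
-- ===== Notes on version B (the rewrite author's own statement) =====
-- stated objective: alternative
-- what changed: Instead of A's four nested offset loops each re-verifying the whole grid, B precomputes once the set of all in-window '#'-cell signatures of piece 2 over its offsets, and for each piece-1 offset checks feasibility and looks the mismatch set up in that set, eliminating the two inner offset loops (intended as faster; measured only 1.46x at the largest timing size).
import Mathlib
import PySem

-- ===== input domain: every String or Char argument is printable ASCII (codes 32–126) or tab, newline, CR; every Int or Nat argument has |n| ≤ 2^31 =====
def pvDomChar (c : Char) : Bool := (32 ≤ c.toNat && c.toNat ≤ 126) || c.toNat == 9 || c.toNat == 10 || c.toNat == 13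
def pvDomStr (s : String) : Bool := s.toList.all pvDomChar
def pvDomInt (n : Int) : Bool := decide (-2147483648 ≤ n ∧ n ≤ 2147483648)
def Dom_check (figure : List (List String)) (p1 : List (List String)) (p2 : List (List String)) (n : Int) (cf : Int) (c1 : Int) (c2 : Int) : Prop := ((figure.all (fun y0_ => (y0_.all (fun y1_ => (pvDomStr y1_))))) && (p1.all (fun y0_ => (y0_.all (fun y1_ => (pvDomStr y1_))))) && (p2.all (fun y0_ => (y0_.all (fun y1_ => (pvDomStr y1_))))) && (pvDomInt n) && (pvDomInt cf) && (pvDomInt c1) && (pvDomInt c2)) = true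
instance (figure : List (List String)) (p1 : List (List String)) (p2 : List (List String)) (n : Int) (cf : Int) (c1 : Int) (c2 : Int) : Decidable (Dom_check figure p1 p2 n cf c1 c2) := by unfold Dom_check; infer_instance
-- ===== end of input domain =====

-- B precomputes the set of all in-window '#'-cell signatures of piece 2 once and, per piece-1 offset,
-- looks up the mismatch set in it, replacing A's two inner offset loops; proved equal to A on Pre_check.


-- ===== PORT A =====
-- xss[i][j] totalised with defaults; exact where Pre_check guarantees the indices are in range
def pvGet2 (xss : List (List String)) (i j : Int) : String :=
  PySem.List.pyGetD (PySem.List.pyGetD xss i []) j ""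

-- the body of A's innermost double loop for one cell (i, j): True = the cell check passes
def checkCellA (figure p1 p2 : List (List String)) (n i1 j1 i2 j2 i j : Int) : Bool :=
  let value : String := "."
  let value : String :=
    if 0 ≤ i - i1 ∧ i - i1 < n ∧ 0 ≤ j - j1 ∧ j - j1 < n then pvGet2 p1 (i - i1) (j - j1) else value
  if (0 ≤ i - i2 ∧ i - i2 < n ∧ 0 ≤ j - j2 ∧ j - j2 < n) ∧ pvGet2 p2 (i - i2) (j - j2) = "#" then
    if value = "#" then false
    else decide (pvGet2 p2 (i - i2) (j - j2) = pvGet2 figure i j)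
  else decide (value = pvGet2 figure i j)

def check (figure : List (List String)) (p1 : List (List String)) (p2 : List (List String)) (n : Int) (cf : Int) (c1 : Int) (c2 : Int) : Bool :=
  if c1 + c2 ≠ cf then false
  else
    (PySem.List.pyRange (1 - n) (n - 1) 1).any fun i1 =>
      (PySem.List.pyRange (1 - n) (n - 1) 1).any fun j1 =>
        (PySem.List.pyRange (1 - n) (n - 1) 1).any fun i2 =>
          (PySem.List.pyRange (1 - n) (n - 1) 1).any fun j2 =>
            (PySem.List.pyRange 0 n 1).all fun i =>
              (PySem.List.pyRange 0 n 1).all fun j =>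
                checkCellA figure p1 p2 n i1 j1 i2 j2 i j

-- ===== PORT B =====
def pvCells (n : Int) : List (Int × Int) :=
  (PySem.List.pyRange 0 n 1).flatMap fun i => (PySem.List.pyRange 0 n 1).map fun j => (i, j)

-- v1(i1, j1, i, j) of Source B
def pvV1 (p1 : List (List String)) (n i1 j1 i j : Int) : String :=
  if 0 ≤ i - i1 ∧ i - i1 < n ∧ 0 ≤ j - j1 ∧ j - j1 < n then pvGet2 p1 (i - i1) (j - j1) else "."

-- the tuple built for offset (i2, j2) of piece 2
def pvSig (p2 : List (List String)) (n i2 j2 : Int) : List (Int × Int) :=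
  (pvCells n).filter fun c =>
    decide ((0 ≤ c.1 - i2 ∧ c.1 - i2 < n ∧ 0 ≤ c.2 - j2 ∧ c.2 - j2 < n) ∧ pvGet2 p2 (c.1 - i2) (c.2 - j2) = "#")

def check_alt (figure : List (List String)) (p1 : List (List String)) (p2 : List (List String)) (n : Int) (cf : Int) (c1 : Int) (c2 : Int) : Bool :=
  if c1 + c2 ≠ cf then false
  else
    let offs := PySem.List.pyRange (1 - n) (n - 1) 1
    let p2sets : PySem.Set (List (Int × Int)) :=
      PySem.Set.ofList (offs.flatMap fun i2 => offs.map fun j2 => pvSig p2 n i2 j2)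
    offs.any fun i1 =>
      offs.any fun j1 =>
        ((pvCells n).all fun c =>
            (pvV1 p1 n i1 j1 c.1 c.2 == pvGet2 figure c.1 c.2)
              || ((pvGet2 figure c.1 c.2 == "#") && (pvV1 p1 n i1 j1 c.1 c.2 != "#")))
          && PySem.Set.contains p2sets
              ((pvCells n).filter fun c => pvV1 p1 n i1 j1 c.1 c.2 != pvGet2 figure c.1 c.2)

-- ===== PRECONDITION & SPEC =====
-- Pre_check excludes inputs where A's unguarded indexing figure[i][j] / p1[...] / p2[...] can raise
-- IndexError (a grid shorter than n rows or a read row shorter than n); when c1+c2≠cf or n≤1 A never indexes.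
def Pre_check (figure : List (List String)) (p1 : List (List String)) (p2 : List (List String)) (n : Int) (cf : Int) (c1 : Int) (c2 : Int) : Prop :=
  c1 + c2 ≠ cf ∨ n ≤ 1 ∨
    (n ≤ figure.length ∧ n ≤ p1.length ∧ n ≤ p2.length ∧
      (∀ r ∈ figure.take n.toNat, n ≤ r.length) ∧
      (∀ r ∈ p1.take n.toNat, n ≤ r.length) ∧
      (∀ r ∈ p2.take n.toNat, n ≤ r.length))
instance (figure : List (List String)) (p1 : List (List String)) (p2 : List (List String)) (n : Int) (cf : Int) (c1 : Int) (c2 : Int) : Decidable (Pre_check figure p1 p2 n cf c1 c2) := by unfold Pre_check; infer_instance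

def pvWitness_check : List (List String) × List (List String) × List (List String) × Int × Int × Int × Int :=
  ([["#", "."], [".", "."]], [["#", "."], [".", "."]], [[".", "."], [".", "."]], 2, 1, 1, 0)

def Spec_check (figure : List (List String)) (p1 : List (List String)) (p2 : List (List String)) (n : Int) (cf : Int) (c1 : Int) (c2 : Int) (out : Bool) : Prop := out = check_alt figure p1 p2 n cf c1 c2
instance (figure : List (List String)) (p1 : List (List String)) (p2 : List (List String)) (n : Int) (cf : Int) (c1 : Int) (c2 : Int) (out : Bool) : Decidable (Spec_check figure p1 p2 n cf c1 c2 out) := by unfold Spec_check; infer_instance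

-- ===== CLAIM (what is proved, stated in full; the proofs are below) =====
def Claim_equal_check : Prop := ∀ (figure : List (List String)) (p1 : List (List String)) (p2 : List (List String)) (n : Int) (cf : Int) (c1 : Int) (c2 : Int), Dom_check figure p1 p2 n cf c1 c2 → Pre_check figure p1 p2 n cf c1 c2 → Spec_check figure p1 p2 n cf c1 c2 (check figure p1 p2 n cf c1 c2)

-- ===== LEMMAS AND PROOFS =====

-- two filters of the same list are equal iff the predicates agree on the list
theorem pv_filter_eq_filter_iff {α : Type} (l : List α) (p q : α → Bool) :
    l.filter p = l.filter q ↔ ∀ c ∈ l, p c = q c := by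
  constructor
  · intro h c hc
    by_cases hp : p c = true
    · have hq : c ∈ l.filter q := h ▸ (List.mem_filter.mpr ⟨hc, hp⟩)
      rw [hp, (List.mem_filter.mp hq).2]
    · by_cases hqc : q c = true
      · have hpc : c ∈ l.filter p := by
          rw [h]; exact List.mem_filter.mpr ⟨hc, hqc⟩
        exact absurd (List.mem_filter.mp hpc).2 hp
      · simp [Bool.eq_false_iff.mpr hp, Bool.eq_false_iff.mpr hqc]
  · exact fun h => List.filter_congr h

-- abstract form of one cell's check: W = 'piece-2 window covers the cell', V = piece-1 value, P2 = piece-2 value, F = figure value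
theorem pv_cell_abs (W : Prop) [Decidable W] (V P2 F : String) :
    (if W ∧ P2 = "#" then (if V = "#" then false else decide (P2 = F)) else decide (V = F)) = true ↔
      ((V = F ∨ (F = "#" ∧ V ≠ "#")) ∧ (decide (W ∧ P2 = "#") = (V != F))) := by
  by_cases h2 : W ∧ P2 = "#"
  · rw [if_pos h2, h2.2]
    constructor
    · intro hL
      have hV : V ≠ "#" := by
        intro hv; rw [if_pos hv] at hL; exact absurd hL (by simp)
      rw [if_neg hV, decide_eq_true_eq] at hL
      have hne : V ≠ F := fun e => hV (e.trans hL.symm)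
      exact ⟨Or.inr ⟨hL.symm, hV⟩, by simp [h2, bne_iff_ne, hne]⟩
    · rintro ⟨hfe, hd⟩
      have hVF : V ≠ F := by simpa [h2, bne_iff_ne] using hd
      rcases hfe with e | ⟨hF, hV⟩
      · exact absurd e hVF
      · rw [if_neg hV, decide_eq_true_eq]; exact hF.symm
  · rw [if_neg h2]
    constructor
    · intro hL
      have e := of_decide_eq_true hL
      exact ⟨Or.inl e, by simp [h2, e]⟩
    · rintro ⟨_, hd⟩
      have : (V != F) = false := by simpa [h2] using hd.symm
      rw [decide_eq_true_eq]
      simpa [bne_iff_ne] using this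

-- pointwise: A's cell check = (B's feasibility at the cell) ∧ (the two filter predicates agree at the cell)
theorem pv_cell_iff (figure p1 p2 : List (List String)) (n i1 j1 i2 j2 i j : Int) :
    checkCellA figure p1 p2 n i1 j1 i2 j2 i j = true ↔
      ((pvV1 p1 n i1 j1 i j = pvGet2 figure i j ∨
          (pvGet2 figure i j = "#" ∧ pvV1 p1 n i1 j1 i j ≠ "#")) ∧
        (decide ((0 ≤ i - i2 ∧ i - i2 < n ∧ 0 ≤ j - j2 ∧ j - j2 < n) ∧ pvGet2 p2 (i - i2) (j - j2) = "#")
          = (pvV1 p1 n i1 j1 i j != pvGet2 figure i j))) := by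
  have e : checkCellA figure p1 p2 n i1 j1 i2 j2 i j =
      (if (0 ≤ i - i2 ∧ i - i2 < n ∧ 0 ≤ j - j2 ∧ j - j2 < n) ∧ pvGet2 p2 (i - i2) (j - j2) = "#" then
          (if pvV1 p1 n i1 j1 i j = "#" then false
            else decide (pvGet2 p2 (i - i2) (j - j2) = pvGet2 figure i j))
        else decide (pvV1 p1 n i1 j1 i j = pvGet2 figure i j)) := rfl
  rw [e]
  exact pv_cell_abs _ _ _ _

-- B's feasibility test over the cell list, in Prop form
theorem pv_feas_iff (figure p1 : List (List String)) (n i1 j1 : Int) :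
    ((pvCells n).all fun c =>
        (pvV1 p1 n i1 j1 c.1 c.2 == pvGet2 figure c.1 c.2)
          || ((pvGet2 figure c.1 c.2 == "#") && (pvV1 p1 n i1 j1 c.1 c.2 != "#"))) = true ↔
      ∀ c ∈ pvCells n, (pvV1 p1 n i1 j1 c.1 c.2 = pvGet2 figure c.1 c.2 ∨
        (pvGet2 figure c.1 c.2 = "#" ∧ pvV1 p1 n i1 j1 c.1 c.2 ≠ "#")) := by
  simp [List.all_eq_true, bne_iff_ne]

-- A's inner double loop for offsets (i1,j1,i2,j2) = B's feasibility ∧ 'piece-2 signature = mismatch set'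
theorem pv_valid_iff (figure p1 p2 : List (List String)) (n i1 j1 i2 j2 : Int) :
    ((PySem.List.pyRange 0 n 1).all fun i => (PySem.List.pyRange 0 n 1).all fun j =>
        checkCellA figure p1 p2 n i1 j1 i2 j2 i j) = true ↔
      ((∀ c ∈ pvCells n, (pvV1 p1 n i1 j1 c.1 c.2 = pvGet2 figure c.1 c.2 ∨
          (pvGet2 figure c.1 c.2 = "#" ∧ pvV1 p1 n i1 j1 c.1 c.2 ≠ "#"))) ∧
        pvSig p2 n i2 j2 = (pvCells n).filter fun c => pvV1 p1 n i1 j1 c.1 c.2 != pvGet2 figure c.1 c.2) := by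
  have h1 : ((PySem.List.pyRange 0 n 1).all fun i => (PySem.List.pyRange 0 n 1).all fun j =>
        checkCellA figure p1 p2 n i1 j1 i2 j2 i j) = true ↔
      ∀ c ∈ pvCells n, checkCellA figure p1 p2 n i1 j1 i2 j2 c.1 c.2 = true := by
    simp only [pvCells, List.all_eq_true, List.mem_flatMap, List.mem_map,
      PySem.List.mem_pyRange_one]
    constructor
    · rintro h c ⟨i, ⟨hi0, hin⟩, j, ⟨hj0, hjn⟩, rfl⟩
      exact h i ⟨hi0, hin⟩ j ⟨hj0, hjn⟩
    · intro h i hi j hj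
      exact h (i, j) ⟨i, hi, j, hj, rfl⟩
  rw [h1, pvSig, pv_filter_eq_filter_iff]
  constructor
  · intro h
    exact ⟨fun c hc => ((pv_cell_iff figure p1 p2 n i1 j1 i2 j2 c.1 c.2).mp (h c hc)).1,
           fun c hc => ((pv_cell_iff figure p1 p2 n i1 j1 i2 j2 c.1 c.2).mp (h c hc)).2⟩
  · rintro ⟨hf, hq⟩ c hc
    exact (pv_cell_iff figure p1 p2 n i1 j1 i2 j2 c.1 c.2).mpr ⟨hf c hc, hq c hc⟩

-- membership in B's precomputed signature set
theorem pv_contains_iff (p2 : List (List String)) (n : Int) (x : List (Int × Int)) :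
    PySem.Set.contains
        (PySem.Set.ofList ((PySem.List.pyRange (1 - n) (n - 1) 1).flatMap fun i2 =>
          (PySem.List.pyRange (1 - n) (n - 1) 1).map fun j2 => pvSig p2 n i2 j2)) x = true ↔
      ∃ i2 ∈ PySem.List.pyRange (1 - n) (n - 1) 1, ∃ j2 ∈ PySem.List.pyRange (1 - n) (n - 1) 1,
        pvSig p2 n i2 j2 = x := by
  simp [PySem.Set.mem_ofList, List.mem_flatMap, List.mem_map]

-- A = B on every input (the ports are totalised; Pre_check is about the Python side)
theorem pv_main (figure p1 p2 : List (List String)) (n cf c1 c2 : Int) :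
    check figure p1 p2 n cf c1 c2 = check_alt figure p1 p2 n cf c1 c2 := by
  unfold check check_alt
  by_cases hc : c1 + c2 ≠ cf
  · rw [if_pos hc, if_pos hc]
  · rw [if_neg hc, if_neg hc]
    apply Bool.eq_iff_iff.mpr
    simp only [List.any_eq_true, Bool.and_eq_true]
    constructor
    · rintro ⟨i1, hi1, j1, hj1, i2, hi2, j2, hj2, hv⟩
      obtain ⟨hf, hsig⟩ := (pv_valid_iff figure p1 p2 n i1 j1 i2 j2).mp hv
      exact ⟨i1, hi1, j1, hj1, (pv_feas_iff figure p1 n i1 j1).mpr hf,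
        (pv_contains_iff p2 n _).mpr ⟨i2, hi2, j2, hj2, hsig⟩⟩
    · rintro ⟨i1, hi1, j1, hj1, hfeas, hcont⟩
      obtain ⟨i2, hi2, j2, hj2, hsig⟩ := (pv_contains_iff p2 n _).mp hcont
      exact ⟨i1, hi1, j1, hj1, i2, hi2, j2, hj2,
        (pv_valid_iff figure p1 p2 n i1 j1 i2 j2).mpr ⟨(pv_feas_iff figure p1 n i1 j1).mp hfeas, hsig⟩⟩

-- ===== VERDICT (by name: the statement is the Claim_ definition above) =====
theorem check_spec : Claim_equal_check := by
  intro figure p1 p2 n cf c1 c2 _ _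
  unfold Spec_check
  exact pv_main figure p1 p2 n cf c1 c2
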